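-- pv_equiv track=rewrite | github.com/crapas1974/algo2 | result/math/06_nand_only.py | converted_to_nand_only
-- ===== SOURCE A (Python) =====
-- def is_symbol(char):
--     return char not in ['+', "'", '(', ')', '*', '@']
--
-- def make_logic_eqstack(expression):
--     expression = expression.strip().replace(' ', '')
--     expression_with_and = ''
--
--     for i in range(len(expression) - 1):
--         expression_with_and += expression[i]
--         if expression[i] == "'" or is_symbol(expression[i]):
--             if expression[i + 1] == "(" or is_symbol(expression[i + 1]):
--                 expression_with_and += '*'
--         if expression[i] == ')':
--             if expression[i + 1] == '(' or is_symbol(expression[i + 1]):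
--                 expression_with_and += '*'
--     expression_with_and += expression[-1]
--     stack = []
--     result = []
--     for char in expression_with_and:
--         if char == "'":
--             result.append(char)
--         elif is_symbol(char):
--             result.append(char)
--         elif char == '(':
--             stack.append(char)
--         elif char == ')':
--             while stack and stack[-1] != '(':
--                 result.append(stack.pop())
--             stack.pop()
--         else:
--             while stack and stack[-1] != '(':
--                 result.append(stack.pop())
--             stack.append(char)
--     while stack:
--         result.append(stack.pop())
--     return result
--
-- def convert_not_to_nand(operand):
--     result = f"({operand}@{operand})"
--     return result
--
-- def convert_and_to_nand(operand1, operand2):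
--     result = f"({operand1}@{operand2})@({operand1}@{operand2})"
--     return result
--
-- def convert_or_to_nand(operand1, operand2):
--     result = f"({operand1}@{operand1})@({operand2}@{operand2})"
--     return result
--
-- def converted_to_nand_only(expression):
--     st = make_logic_eqstack(expression)
--     changed_result = []
--
--     for char in st:
--         if char not in ['+', '*', "'"]:
--             changed_result.append(char)
--         else:
--             if char == "'":
--                 operand1 = changed_result.pop()
--                 changed_result.append(convert_not_to_nand(operand1))
--             else:
--                 operand2 = changed_result.pop()
--                 operand1 = changed_result.pop()
--                 if char == '+':
--                     changed_result.append("(" + convert_or_to_nand(operand1, operand2) + ")")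
--                 elif char == '*':
--                     changed_result.append("(" + convert_and_to_nand(operand1, operand2) + ")")
--     return changed_result[0]
-- ===== SOURCE B (Python) =====
-- def is_symbol(char):
--     return char not in ['+', "'", '(', ')', '*', '@']
--
-- def converted_to_nand_only(expression):
--     expr = expression.strip().replace(' ', '')
--     with_and = ''
--     for i in range(len(expr) - 1):
--         with_and += expr[i]
--         if expr[i] == "'" or is_symbol(expr[i]):
--             if expr[i + 1] == '(' or is_symbol(expr[i + 1]):
--                 with_and += '*'
--         if expr[i] == ')':
--             if expr[i + 1] == '(' or is_symbol(expr[i + 1]):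
--                 with_and += '*'
--     with_and += expr[-1]
--
--     operands = []
--     ops = []
--
--     def apply_op(o):
--         if o == '+':
--             b = operands.pop()
--             a = operands.pop()
--             operands.append(f"(({a}@{a})@({b}@{b}))")
--         elif o == '*':
--             b = operands.pop()
--             a = operands.pop()
--             operands.append(f"(({a}@{b})@({a}@{b}))")
--         else:
--             operands.append(o)
--
--     for c in with_and:
--         if c == "'":
--             a = operands.pop()
--             operands.append(f"({a}@{a})")
--         elif is_symbol(c):
--             operands.append(c)
--         elif c == '(':
--             ops.append(c)
--         elif c == ')':
--             while ops and ops[-1] != '(':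
--                 apply_op(ops.pop())
--             ops.pop()
--         else:
--             while ops and ops[-1] != '(':
--                 apply_op(ops.pop())
--             ops.append(c)
--     while ops:
--         apply_op(ops.pop())
--     return operands[0]
-- ===== Notes on version B (the rewrite author's own statement) =====
-- stated objective: alternative
-- what changed: B fuses A's two passes (build a full postfix token list, then evaluate it) into one operator-precedence scan that keeps a stack of already-NAND-converted operand strings and converts at operator-pop time, so no intermediate postfix list exists.
import Mathlib
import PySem

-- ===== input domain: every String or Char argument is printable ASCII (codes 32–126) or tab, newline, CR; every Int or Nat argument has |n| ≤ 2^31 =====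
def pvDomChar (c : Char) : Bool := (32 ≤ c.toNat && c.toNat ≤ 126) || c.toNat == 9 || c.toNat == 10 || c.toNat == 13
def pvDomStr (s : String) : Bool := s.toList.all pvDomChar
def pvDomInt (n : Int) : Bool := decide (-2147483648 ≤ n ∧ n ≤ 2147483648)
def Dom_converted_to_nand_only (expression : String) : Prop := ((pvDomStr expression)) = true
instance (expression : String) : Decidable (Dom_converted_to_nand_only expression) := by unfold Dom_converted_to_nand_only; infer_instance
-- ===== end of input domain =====

-- B fuses A's two passes (postfix construction + postfix evaluation) into a single
-- operator-precedence scan that converts to NAND at operator-pop time ('alternative':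
-- one pass, no intermediate postfix list; same cost class).

-- ===== PORT A =====
-- shared with B: both Pythons define the identical is_symbol and the identical
-- strip/replace + implicit-'*' preprocessing, so the ports share these helpers.
def pvIsSymbol (c : Char) : Bool := !(['+', '\'', '(', ')', '*', '@'].contains c)

def pvClean (expression : String) : List Char :=
  PySem.Chars.replace (PySem.Chars.strip expression.toList) [' '] []

def pvInsertAux : List Char → List Char
  | [] => []
  | [c] => [c]
  | c1 :: c2 :: rest =>
      c1 ::
      ((if (c1 = '\'' || pvIsSymbol c1) && (c2 = '(' || pvIsSymbol c2) then ['*'] else []) ++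
       (if c1 = ')' && (c2 = '(' || pvIsSymbol c2) then ['*'] else []) ++
       pvInsertAux (c2 :: rest))

-- none = Python's IndexError at `expression[-1]` on the empty (stripped) string
def pvInsertAnd : List Char → Option (List Char)
  | [] => none
  | c :: cs => some (pvInsertAux (c :: cs))

-- Source A's convert_not/or/and_to_nand (over List Char)
def pvConvNot (a : List Char) : List Char := ['('] ++ a ++ ['@'] ++ a ++ [')']
def pvConvOr (a b : List Char) : List Char :=
  ['('] ++ a ++ ['@'] ++ a ++ [')', '@', '('] ++ b ++ ['@'] ++ b ++ [')']
def pvConvAnd (a b : List Char) : List Char :=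
  ['('] ++ a ++ ['@'] ++ b ++ [')', '@', '('] ++ a ++ ['@'] ++ b ++ [')']

-- the `while stack and stack[-1] != '(': result.append(stack.pop())` loop:
-- returns (popped operators in pop order, remaining stack)
def pvPopUntil : List Char → List Char × List Char
  | [] => ([], [])
  | c :: st =>
      if c = '(' then ([], c :: st)
      else
        let pr := pvPopUntil st
        (c :: pr.1, pr.2)

-- phase 1 of Source A (shunting loop + final drain); stack top-first; none = IndexError
def pvShuntA : List Char → List Char → Option (List Char)
  | [], st => some st
  | c :: ts, st =>
      if c = '\'' then (pvShuntA ts st).map (c :: ·)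
      else if pvIsSymbol c then (pvShuntA ts st).map (c :: ·)
      else if c = '(' then pvShuntA ts (c :: st)
      else if c = ')' then
        match pvPopUntil st with
        | (_, []) => none
        | (p, _ :: r) => (pvShuntA ts r).map (p ++ ·)
      else
        match pvPopUntil st with
        | (p, r) => (pvShuntA ts (c :: r)).map (p ++ ·)

-- phase 2 of Source A (the changed_result loop); acc top-first; none = IndexError on pop
def pvEvalA : List Char → List (List Char) → Option (List (List Char))
  | [], acc => some acc
  | c :: rs, acc =>
      if !(['+', '*', '\''].contains c) then pvEvalA rs ([c] :: acc)
      else if c = '\'' then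
        match acc with
        | [] => none
        | a :: acc' => pvEvalA rs (pvConvNot a :: acc')
      else
        match acc with
        | b :: a :: acc' =>
            if c = '+' then pvEvalA rs ((['('] ++ pvConvOr a b ++ [')']) :: acc')
            else if c = '*' then pvEvalA rs ((['('] ++ pvConvAnd a b ++ [')']) :: acc')
            else pvEvalA rs acc'
        | _ => none

-- changed_result[0] is the first-appended = last element of the top-first stack;
-- "" stands for the inputs where Python raises (excluded by Pre_)
def converted_to_nand_only (expression : String) : String :=
  match ((((pvInsertAnd (pvClean expression)).bind (fun ts => pvShuntA ts [])).bind
      (fun res => pvEvalA res [])).bind (fun acc => acc.getLast?)) with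
  | some s => String.ofList s
  | none => ""

-- ===== PORT B =====
-- Source B's apply_op: '+'/'*' pop two operands and push the NAND form (f-string flattened);
-- anything else popped from the operator stack is pushed back as a one-char operand
def pvApplyOpB (o : Char) (acc : List (List Char)) : Option (List (List Char)) :=
  if o = '+' then
    match acc with
    | b :: a :: acc' =>
        some ((['(', '('] ++ a ++ ['@'] ++ a ++ [')', '@', '('] ++ b ++ ['@'] ++ b ++ [')', ')']) :: acc')
    | _ => none
  else if o = '*' then
    match acc with
    | b :: a :: acc' =>
        some ((['(', '('] ++ a ++ ['@'] ++ b ++ [')', '@', '('] ++ a ++ ['@'] ++ b ++ [')', ')']) :: acc')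
    | _ => none
  else some ([o] :: acc)

-- Source B's `while ops and ops[-1] != '(': apply_op(ops.pop())`
def pvApplyUntilParen : List Char → List (List Char) → Option (List (List Char) × List Char)
  | [], acc => some (acc, [])
  | o :: st, acc =>
      if o = '(' then some (acc, o :: st)
      else
        match pvApplyOpB o acc with
        | none => none
        | some acc' => pvApplyUntilParen st acc'

-- Source B's final `while ops: apply_op(ops.pop())`
def pvDrainB : List Char → List (List Char) → Option (List (List Char))
  | [], acc => some acc
  | o :: st, acc =>
      match pvApplyOpB o acc with
      | none => none
      | some acc' => pvDrainB st acc'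

-- Source B's single fused scan: operand stack acc, operator stack st (both top-first)
def pvRunB : List Char → List (List Char) → List Char → Option (List (List Char))
  | [], acc, st => pvDrainB st acc
  | c :: ts, acc, st =>
      if c = '\'' then
        match acc with
        | [] => none
        | a :: acc' => pvRunB ts ((['('] ++ a ++ ['@'] ++ a ++ [')']) :: acc') st
      else if pvIsSymbol c then pvRunB ts ([c] :: acc) st
      else if c = '(' then pvRunB ts acc (c :: st)
      else if c = ')' then
        match pvApplyUntilParen st acc with
        | none => none
        | some (_, []) => none
        | some (acc', _ :: r) => pvRunB ts acc' r
      else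
        match pvApplyUntilParen st acc with
        | none => none
        | some (acc', r) => pvRunB ts acc' (c :: r)

def converted_to_nand_only_alt (expression : String) : String :=
  match (((pvInsertAnd (pvClean expression)).bind (fun ts => pvRunB ts [] [])).bind
      (fun acc => acc.getLast?)) with
  | some s => String.ofList s
  | none => ""

-- ===== PRECONDITION & SPEC =====
-- the operand-availability automaton behind Pre_: it tracks only the COUNT of pending
-- operands and the operator/paren stack, no strings — true exactly when A's scan never
-- underflows a pop and ends with a first operand to return
def pvApplyCnt (o : Char) (n : Nat) : Option Nat :=
  if o = '+' || o = '*' then (if 2 ≤ n then some (n - 1) else none) else some (n + 1)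

def pvDrainCnt : List Char → Nat → Option Nat
  | [], n => some n
  | o :: st, n =>
      match pvApplyCnt o n with
      | none => none
      | some n' => pvDrainCnt st n'

def pvOkRun : List Char → Nat → List Char → Bool
  | [], n, st =>
      match pvDrainCnt st n with
      | none => false
      | some m => decide (1 ≤ m)
  | c :: ts, n, st =>
      if c = '\'' then decide (1 ≤ n) && pvOkRun ts n st
      else if pvIsSymbol c then pvOkRun ts (n + 1) st
      else if c = '(' then pvOkRun ts n (c :: st)
      else if c = ')' then
        match pvPopUntil st with
        | (_, []) => false
        | (p, _ :: r) =>
            match pvDrainCnt p n with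
            | none => false
            | some n' => pvOkRun ts n' r
      else
        match pvPopUntil st with
        | (p, r) =>
            match pvDrainCnt p n with
            | none => false
            | some n' => pvOkRun ts n' (c :: r)

def pvOk (expression : String) : Bool :=
  match pvInsertAnd (pvClean expression) with
  | none => false
  | some ts => pvOkRun ts 0 []

-- Pre_ holds exactly on the inputs where the Python A returns normally: it excludes the
-- inputs where A raises IndexError (empty stripped expression, a ')' with no matching '(',
-- an operator pop with too few operands, or an empty final result); B raises there too.
def Pre_converted_to_nand_only (expression : String) : Prop := pvOk expression = true
instance (expression : String) : Decidable (Pre_converted_to_nand_only expression) := by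
  unfold Pre_converted_to_nand_only; infer_instance

def pvWitness_converted_to_nand_only : String := "(a+b')*c"

def Spec_converted_to_nand_only (expression : String) (out : String) : Prop :=
  out = converted_to_nand_only_alt expression
instance (expression : String) (out : String) : Decidable (Spec_converted_to_nand_only expression out) := by
  unfold Spec_converted_to_nand_only; infer_instance

-- ===== CLAIM (what is proved, stated in full; the proofs are below) =====
def Claim_equal_converted_to_nand_only : Prop :=
  ∀ (expression : String), Dom_converted_to_nand_only expression →
    Pre_converted_to_nand_only expression →
      Spec_converted_to_nand_only expression (converted_to_nand_only expression)

-- ===== LEMMAS AND PROOFS =====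

theorem pvPopUntil_append (st : List Char) :
    (pvPopUntil st).1 ++ (pvPopUntil st).2 = st := by
  induction st with
  | nil => simp [pvPopUntil]
  | cons c st ih =>
      by_cases h : c = '('
      · simp [pvPopUntil, h]
      · simp [pvPopUntil, h, ih]

theorem pvEvalA_append (r1 r2 : List Char) (acc : List (List Char)) :
    pvEvalA (r1 ++ r2) acc = (pvEvalA r1 acc).bind (fun a => pvEvalA r2 a) := by
  induction r1 generalizing acc with
  | nil => simp [pvEvalA]
  | cons c r1 ih =>
      cases acc with
      | nil =>
          simp only [List.cons_append, pvEvalA]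
          split_ifs <;> first | exact ih _ | simp
      | cons b acc' =>
          cases acc' with
          | nil =>
              simp only [List.cons_append, pvEvalA]
              split_ifs <;> first | exact ih _ | simp
          | cons a acc'' =>
              simp only [List.cons_append, pvEvalA]
              split_ifs <;> first | exact ih _ | simp

set_option maxRecDepth 4000 in
theorem pvApplyOpB_eq (o : Char) (acc : List (List Char)) (ho : o ≠ '\'') :
    pvApplyOpB o acc = pvEvalA [o] acc := by
  by_cases h1 : o = '+'
  · subst h1
    cases acc with
    | nil => simp [pvApplyOpB, pvEvalA]
    | cons b acc' =>
        cases acc' with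
        | nil => simp [pvApplyOpB, pvEvalA]
        | cons a acc'' => simp [pvApplyOpB, pvEvalA, pvConvOr, List.append_assoc]
  · by_cases h2 : o = '*'
    · subst h2
      cases acc with
      | nil => simp [pvApplyOpB, pvEvalA]
      | cons b acc' =>
          cases acc' with
          | nil => simp [pvApplyOpB, pvEvalA]
          | cons a acc'' => simp [pvApplyOpB, pvEvalA, pvConvAnd, List.append_assoc]
    · have hmem : (['+', '*', '\''].contains o) = false := by
        simp [List.contains_eq_mem, h1, h2, ho]
      simp [pvApplyOpB, pvEvalA, h1, h2, ho, hmem]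

theorem pvDrainB_eq (st : List Char) (acc : List (List Char))
    (h : ∀ c ∈ st, c ≠ '\'') :
    pvDrainB st acc = pvEvalA st acc := by
  induction st generalizing acc with
  | nil => simp [pvDrainB, pvEvalA]
  | cons o st ih =>
      have ho : o ≠ '\'' := h o (by simp)
      have hrest : ∀ c ∈ st, c ≠ '\'' := fun c hc => h c (by simp [hc])
      have hsplit : pvEvalA (o :: st) acc = (pvEvalA [o] acc).bind (fun a => pvEvalA st a) := by
        have := pvEvalA_append [o] st acc
        simpa using this
      rw [hsplit, ← pvApplyOpB_eq o acc ho]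
      unfold pvDrainB
      cases hop : pvApplyOpB o acc with
      | none => simp
      | some acc' => simp [ih acc' hrest]

theorem pvApplyUntilParen_eq (st : List Char) (acc : List (List Char)) :
    pvApplyUntilParen st acc =
      (pvDrainB (pvPopUntil st).1 acc).map (fun a => (a, (pvPopUntil st).2)) := by
  induction st generalizing acc with
  | nil => simp [pvApplyUntilParen, pvPopUntil, pvDrainB]
  | cons o st ih =>
      by_cases h : o = '('
      · simp [pvApplyUntilParen, pvPopUntil, pvDrainB, h]
      · simp only [pvApplyUntilParen, pvPopUntil, h, if_false]
        cases hop : pvApplyOpB o acc with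
        | none => simp [pvDrainB, hop]
        | some acc' => simp [pvDrainB, hop, ih acc']

theorem pv_emitList_bind (p : List Char) (s : Option (List Char)) (acc : List (List Char)) :
    (s.map (p ++ ·)).bind (fun res => pvEvalA res acc)
      = (pvEvalA p acc).bind (fun a => s.bind (fun res => pvEvalA res a)) := by
  cases s with
  | none => cases h : pvEvalA p acc <;> simp
  | some res => simp [pvEvalA_append p res acc]

theorem pv_emit_bind (tok : Char) (s : Option (List Char)) (acc : List (List Char)) :
    (s.map (tok :: ·)).bind (fun res => pvEvalA res acc)
      = (pvEvalA [tok] acc).bind (fun a => s.bind (fun res => pvEvalA res a)) := by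
  have := pv_emitList_bind [tok] s acc
  simpa using this

-- one-step unfolding lemmas for the two scans
theorem pvShuntA_quote (ts st : List Char) :
    pvShuntA ('\'' :: ts) st = (pvShuntA ts st).map ('\'' :: ·) := rfl

theorem pvShuntA_symbol (c : Char) (ts st : List Char)
    (h1 : c ≠ '\'') (h2 : pvIsSymbol c = true) :
    pvShuntA (c :: ts) st = (pvShuntA ts st).map (c :: ·) := by
  simp [pvShuntA, h1, h2]

theorem pvShuntA_lparen (ts st : List Char) :
    pvShuntA ('(' :: ts) st = pvShuntA ts ('(' :: st) := rfl

theorem pvShuntA_rparen (ts st : List Char) :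
    pvShuntA (')' :: ts) st =
      (match pvPopUntil st with
       | (_, []) => none
       | (p, _ :: r) => (pvShuntA ts r).map (p ++ ·)) := rfl

theorem pvShuntA_op (c : Char) (ts st : List Char)
    (h1 : c ≠ '\'') (h2 : pvIsSymbol c = false) (h3 : c ≠ '(') (h4 : c ≠ ')') :
    pvShuntA (c :: ts) st =
      (match pvPopUntil st with
       | (p, r) => (pvShuntA ts (c :: r)).map (p ++ ·)) := by
  simp [pvShuntA, h1, h2, h3, h4]

theorem pvRunB_quote_nil (ts st : List Char) :
    pvRunB ('\'' :: ts) [] st = none := rfl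

theorem pvRunB_quote_cons (ts st : List Char) (a : List Char) (acc' : List (List Char)) :
    pvRunB ('\'' :: ts) (a :: acc') st
      = pvRunB ts ((['('] ++ a ++ ['@'] ++ a ++ [')']) :: acc') st := rfl

theorem pvRunB_symbol (c : Char) (ts : List Char) (acc : List (List Char)) (st : List Char)
    (h1 : c ≠ '\'') (h2 : pvIsSymbol c = true) :
    pvRunB (c :: ts) acc st = pvRunB ts ([c] :: acc) st := by
  simp [pvRunB, h1, h2]

theorem pvRunB_lparen (ts : List Char) (acc : List (List Char)) (st : List Char) :
    pvRunB ('(' :: ts) acc st = pvRunB ts acc ('(' :: st) := rfl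

theorem pvRunB_rparen (ts : List Char) (acc : List (List Char)) (st : List Char) :
    pvRunB (')' :: ts) acc st =
      (match pvApplyUntilParen st acc with
       | none => none
       | some (_, []) => none
       | some (acc', _ :: r) => pvRunB ts acc' r) := rfl

theorem pvRunB_op (c : Char) (ts : List Char) (acc : List (List Char)) (st : List Char)
    (h1 : c ≠ '\'') (h2 : pvIsSymbol c = false) (h3 : c ≠ '(') (h4 : c ≠ ')') :
    pvRunB (c :: ts) acc st =
      (match pvApplyUntilParen st acc with
       | none => none
       | some (acc', r) => pvRunB ts acc' (c :: r)) := by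
  simp [pvRunB, h1, h2, h3, h4]

theorem pvRunB_eq (ts : List Char) (acc : List (List Char)) (st : List Char)
    (hst : ∀ c ∈ st, c ≠ '\'') :
    pvRunB ts acc st = (pvShuntA ts st).bind (fun res => pvEvalA res acc) := by
  induction ts generalizing acc st with
  | nil => simp [pvRunB, pvShuntA, pvDrainB_eq st acc hst]
  | cons c ts ih =>
      have hsplit := pvPopUntil_append st
      by_cases h1 : c = '\''
      · subst h1
        cases acc with
        | nil =>
            rw [pvRunB_quote_nil, pvShuntA_quote, pv_emit_bind]
            simp [pvEvalA]
        | cons a acc' =>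
            rw [pvRunB_quote_cons, pvShuntA_quote, pv_emit_bind,
              ih ((['('] ++ a ++ ['@'] ++ a ++ [')']) :: acc') st hst]
            simp [pvEvalA, pvConvNot]
      · by_cases h2 : pvIsSymbol c = true
        · have h2' := h2
          simp [pvIsSymbol, List.contains_eq_mem] at h2'
          obtain ⟨hA, hB, hC, hD, hE, hF⟩ := h2'
          rw [pvRunB_symbol c ts acc st h1 h2, pvShuntA_symbol c ts st h1 h2,
            pv_emit_bind, ih ([c] :: acc) st hst]
          simp [pvEvalA, hA, hE, h1]
        · have h2' : pvIsSymbol c = false := by simpa using h2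
          by_cases h3 : c = '('
          · subst h3
            rw [pvRunB_lparen, pvShuntA_lparen]
            exact ih acc ('(' :: st) (by
              intro x hx
              rcases List.mem_cons.mp hx with h | h
              · subst h; decide
              · exact hst x h)
          · have hp1 : ∀ x ∈ (pvPopUntil st).1, x ≠ '\'' := by
              intro x hx
              exact hst x (by rw [← hsplit]; exact List.mem_append.mpr (Or.inl hx))
            by_cases h4 : c = ')'
            · subst h4
              rw [pvRunB_rparen, pvShuntA_rparen, pvApplyUntilParen_eq st acc,
                pvDrainB_eq _ acc hp1]
              cases hr : pvPopUntil st with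
              | mk p r =>
                  rw [hr] at hsplit
                  cases r with
                  | nil => cases hd : pvEvalA p acc <;> simp
                  | cons x r' =>
                      have hr' : ∀ y ∈ r', y ≠ '\'' := by
                        intro y hy
                        exact hst y (by rw [← hsplit]; simp [hy])
                      rw [pv_emitList_bind p (pvShuntA ts r') acc]
                      cases hd : pvEvalA p acc with
                      | none => simp
                      | some a => simp [ih a r' hr']
            · rw [pvRunB_op c ts acc st h1 h2' h3 h4, pvShuntA_op c ts st h1 h2' h3 h4,
                pvApplyUntilParen_eq st acc, pvDrainB_eq _ acc hp1]
              cases hr : pvPopUntil st with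
              | mk p r =>
                  rw [hr] at hsplit
                  have hcr : ∀ x ∈ (c :: r), x ≠ '\'' := by
                    intro x hx
                    rcases List.mem_cons.mp hx with h | h
                    · subst h; exact h1
                    · exact hst x (by rw [← hsplit]; simp [h])
                  rw [pv_emitList_bind p (pvShuntA ts (c :: r)) acc]
                  cases hd : pvEvalA p acc with
                  | none => simp
                  | some a => simp [ih a (c :: r) hcr]

theorem pv_total_eq (expression : String) :
    converted_to_nand_only expression = converted_to_nand_only_alt expression := by
  unfold converted_to_nand_only converted_to_nand_only_alt
  cases h : pvInsertAnd (pvClean expression) with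
  | none => simp
  | some ts =>
      have hrb := pvRunB_eq ts [] [] (by intro x hx; simp at hx)
      simp [hrb, Option.bind_assoc]

-- ===== VERDICT (by name: the statement is the Claim_ definition above) =====
theorem converted_to_nand_only_spec : Claim_equal_converted_to_nand_only := by
  intro expression _ _
  unfold Spec_converted_to_nand_only
  exact pv_total_eq expression
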